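-- pv_equiv track=rewrite | github.com/koubaj/alp | SEM/web_source/filajan1.py | obsah_karet
-- ===== SOURCE A (Python) =====
-- def obsah_karet(pole):
--         max_vyska = 0
--         max_sirka = 0
--         for karta in pole:
--             vyska = len(karta)
--             sirka = len(karta[0])
--             if vyska > max_vyska:
--                 max_vyska = vyska
--             if sirka > max_sirka:
--                 max_sirka = sirka
--         return max_vyska,max_sirka
-- ===== SOURCE B (Python) =====
-- def obsah_karet(pole):
--     if not pole:
--         return 0, 0
--     vysky = sorted(len(karta) for karta in pole)
--     sirky = sorted(len(karta[0]) for karta in pole)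
--     return vysky[-1], sirky[-1]
-- ===== Notes on version B (the rewrite author's own statement) =====
-- stated objective: alternative
-- what changed: Replaces the fused linear scan with two running maxima by sorting the list of heights and the list of widths and taking the last element of each sorted list (sort-then-last instead of a scan; empty input handled by an explicit early return).
import Mathlib
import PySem

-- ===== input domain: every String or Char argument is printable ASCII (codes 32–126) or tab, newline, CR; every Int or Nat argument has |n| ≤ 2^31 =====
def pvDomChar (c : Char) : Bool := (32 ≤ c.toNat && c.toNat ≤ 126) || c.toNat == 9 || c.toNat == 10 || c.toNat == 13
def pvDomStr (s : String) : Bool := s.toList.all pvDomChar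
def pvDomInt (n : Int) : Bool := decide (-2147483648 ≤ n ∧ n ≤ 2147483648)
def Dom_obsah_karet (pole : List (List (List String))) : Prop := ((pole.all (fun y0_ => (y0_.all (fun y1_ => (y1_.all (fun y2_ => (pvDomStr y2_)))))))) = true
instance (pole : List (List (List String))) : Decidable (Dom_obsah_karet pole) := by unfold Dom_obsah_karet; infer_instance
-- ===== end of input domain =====

-- B replaces A's fused single scan with two running maxima by sorting the heights and the widths and taking the last element of each sorted list (an alternative, sort-based extremum); return values agree on Pre_ (A raises IndexError on inputs excluded by Pre_).
-- ===== PORT A =====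
def obsah_karet (pole : List (List (List String))) : Int × Int :=
  pole.foldl
    (fun (acc : Int × Int) karta =>
      let vyska : Int := karta.length
      let sirka : Int := ((PySem.List.pyGet? karta 0).getD []).length
      let mv : Int := if vyska > acc.1 then vyska else acc.1
      let ms : Int := if sirka > acc.2 then sirka else acc.2
      (mv, ms))
    (0, 0)

-- ===== PORT B =====
def obsah_karet_alt (pole : List (List (List String))) : Int × Int :=
  if pole = [] then (0, 0)
  else
    let vysky := PySem.List.sorted (pole.map (fun karta => (karta.length : Int))) (fun x => x) false
    let sirky := PySem.List.sorted (pole.map (fun karta => (((PySem.List.pyGet? karta 0).getD []).length : Int))) (fun x => x) false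
    ((PySem.List.pyGet? vysky (-1)).getD 0, (PySem.List.pyGet? sirky (-1)).getD 0)

-- ===== PRECONDITION & SPEC =====
-- Pre_ excludes inputs containing an empty card, on which both Pythons raise IndexError (karta[0]).
def Pre_obsah_karet (pole : List (List (List String))) : Prop :=
  ∀ karta ∈ pole, karta ≠ []
instance (pole : List (List (List String))) : Decidable (Pre_obsah_karet pole) := by unfold Pre_obsah_karet; infer_instance
def pvWitness_obsah_karet : List (List (List String)) := [[["ab"], ["cd"]], [["x", "y"]]]
def Spec_obsah_karet (pole : List (List (List String))) (out : Int × Int) : Prop := out = obsah_karet_alt pole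
instance (pole : List (List (List String))) (out : Int × Int) : Decidable (Spec_obsah_karet pole out) := by unfold Spec_obsah_karet; infer_instance

-- ===== CLAIM (what is proved, stated in full; the proofs are below) =====
def Claim_equal_obsah_karet : Prop := ∀ (pole : List (List (List String))), Dom_obsah_karet pole → Pre_obsah_karet pole → Spec_obsah_karet pole (obsah_karet pole)

-- ===== LEMMAS AND PROOFS =====

-- the fused fold with two running maxima equals the pair of independent max-folds
lemma fold_pair (l : List (List (List String))) (a b : Int) :
    l.foldl
      (fun (acc : Int × Int) karta =>
        let vyska : Int := karta.length
        let sirka : Int := ((PySem.List.pyGet? karta 0).getD []).length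
        let mv : Int := if vyska > acc.1 then vyska else acc.1
        let ms : Int := if sirka > acc.2 then sirka else acc.2
        (mv, ms))
      (a, b)
    = (l.foldl (fun m karta => max m (karta.length : Int)) a,
       l.foldl (fun m karta => max m ((((PySem.List.pyGet? karta 0).getD []).length : Int))) b) := by
  induction l generalizing a b with
  | nil => rfl
  | cons x xs ih =>
    simp only [List.foldl_cons]
    rw [ih]
    congr 1 <;> congr 1 <;> simp [max_def] <;> omega

-- in a ≤-sorted list every element is at most the last one
lemma le_getLast_of_pairwise {l : List Int} (hp : l.Pairwise (· ≤ ·)) (h : l ≠ [])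
    {x : Int} (hx : x ∈ l) : x ≤ l.getLast h := by
  rw [List.pairwise_iff_getElem] at hp
  obtain ⟨i, hi, rfl⟩ := List.mem_iff_getElem.mp hx
  rw [List.getLast_eq_getElem]
  rcases eq_or_lt_of_le (Nat.le_pred_of_lt hi) with heq | hlt
  · simp [heq]
  · exact hp i (l.length - 1) hi (by omega) hlt

-- the last element of sorted(l) is the max of l
lemma sorted_getLast?_eq_max? (l : List Int) :
    (PySem.List.sorted l (fun x => x) false).getLast? = l.max? := by
  rcases hs : PySem.List.sorted l (fun x => x) false with _ | ⟨m, t⟩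
  · have : l = [] := by
      have := PySem.List.sorted_perm l (fun x => x) false
      rw [hs] at this
      exact (List.Perm.nil_eq this).symm
    simp [this]
  · have hperm : (PySem.List.sorted l (fun x => x) false).Perm l :=
      PySem.List.sorted_perm l (fun x => x) false
    have hpw : (PySem.List.sorted l (fun x => x) false).Pairwise (· ≤ ·) := by
      have := PySem.List.sorted_pairwise l (fun x => x)
      simpa using this
    have hne : PySem.List.sorted l (fun x => x) false ≠ [] := by simp [hs]
    set s := PySem.List.sorted l (fun x => x) false with hsdef
    have hlastmem : s.getLast hne ∈ l := hperm.mem_iff.mp (List.getLast_mem hne)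
    have hmax : l.max? = some (s.getLast hne) := by
      refine List.max?_eq_some_iff.mpr ⟨hlastmem, fun x hx => ?_⟩
      exact le_getLast_of_pairwise hpw hne (hperm.mem_iff.mpr hx)
    rw [hmax, ← hs]
    exact List.getLast?_eq_some_getLast hne
  
-- the running max-fold from 0 over nonnegative values equals the sorted-last form
lemma max_fold_eq_sorted_last (f : List (List String) → Int) (hf : ∀ k, 0 ≤ f k)
    (l : List (List (List String))) (hne : l ≠ []) :
    l.foldl (fun m karta => max m (f karta)) 0
      = (PySem.List.pyGet? (PySem.List.sorted (l.map f) (fun x => x) false) (-1)).getD 0 := by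
  rw [PySem.List.pyGet?_neg_one, sorted_getLast?_eq_max?]
  cases l with
  | nil => exact absurd rfl hne
  | cons x xs =>
    simp only [List.foldl_cons, List.map_cons, List.max?_cons', Option.getD_some, List.foldl_map]
    rw [max_comm 0 (f x), max_eq_left (hf x)]

-- ===== VERDICT (by name: the statement is the Claim_ definition above) =====
theorem obsah_karet_spec : Claim_equal_obsah_karet := by
  intro pole _ _
  unfold Spec_obsah_karet obsah_karet obsah_karet_alt
  rw [fold_pair]
  by_cases hp : pole = []
  · simp [hp]
  · simp only [hp, if_false]
    congr 1
    · exact max_fold_eq_sorted_last _ (fun k => Int.natCast_nonneg _) pole hp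
    · exact max_fold_eq_sorted_last _ (fun k => Int.natCast_nonneg _) pole hp
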